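-- pv_equiv track=rewrite | github.com/Swaav/backend-nested-brackets | nested.py | bracket_checker
-- ===== SOURCE A (Python) =====
-- def bracket_checker(string):
--     # openers = ["[", "{", "(", "<", "(*"]
--     # closers = ["]", "}", ")", ">", "*)"]
--     bracket_dictionary = {')': '(', '}': '{', ']': '[', '>': '<', '*)': '(*'}
--     stack = []
--     token_count = 0
--
--     while string:
--         token = string[0]
--         if string.startswith('(*'):
--             token = '(*'
--         elif string.startswith('*)'):
--             token = '*)'
--         string = string[len(token):]
--         token_count += 1
--         if token in bracket_dictionary.values():
--             stack.append(token)
--         elif token in bracket_dictionary.keys():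
--             if not stack or stack.pop() != bracket_dictionary[token]:
--                 return ('NO '+ str(token_count))
--     if stack:
--         return ('NO ' + str(token_count))
--
--     else:
--         return 'YES'
-- ===== SOURCE B (Python) =====
-- def bracket_checker(string):
--     # two-phase: tokenize once, then match tokens with an explicit stack
--     pairs = {')': '(', '}': '{', ']': '[', '>': '<', '*)': '(*'}
--     openers = set(pairs.values())
--
--     tokens = []
--     i = 0
--     n = len(string)
--     while i < n:
--         two = string[i:i+2]
--         if two == '(*' or two == '*)':
--             tokens.append(two)
--             i += 2
--         else:
--             tokens.append(string[i])
--             i += 1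
--
--     stack = []
--     for idx, tok in enumerate(tokens):
--         if tok in openers:
--             stack.append(tok)
--         elif tok in pairs:
--             if not stack or stack.pop() != pairs[tok]:
--                 return 'NO ' + str(idx + 1)
--     return 'NO ' + str(len(tokens)) if stack else 'YES'
-- ===== Notes on version B (the rewrite author's own statement) =====
-- stated objective: faster
-- what changed: Replaces A's single interleaved loop that re-slices the remaining string on every token by two phases: an index-based tokenizer that builds the full token list once, then a stack fold over that list by enumerate index.
import Mathlib
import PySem

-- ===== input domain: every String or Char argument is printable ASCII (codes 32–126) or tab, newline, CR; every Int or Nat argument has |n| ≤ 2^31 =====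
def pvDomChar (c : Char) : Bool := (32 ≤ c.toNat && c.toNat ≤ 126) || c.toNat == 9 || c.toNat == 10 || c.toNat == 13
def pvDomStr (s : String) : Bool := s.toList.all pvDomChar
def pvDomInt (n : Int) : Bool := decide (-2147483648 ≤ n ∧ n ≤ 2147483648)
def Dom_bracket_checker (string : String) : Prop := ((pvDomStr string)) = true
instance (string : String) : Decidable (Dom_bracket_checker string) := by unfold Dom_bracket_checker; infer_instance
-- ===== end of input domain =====

-- B tokenizes the whole string once and then matches over the token list; A consumes the string in one interleaved loop. Return values proved equal; no argument is mutated.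

-- ===== PORT A =====
-- bracket_dictionary = {')': '(', '}': '{', ']': '[', '>': '<', '*)': '(*'}
def pvBDict : List (String × String) := [(")", "("), ("}", "{"), ("]", "["), (">", "<"), ("*)", "(*")]

-- the while loop of A: state = (remaining string, stack, token_count); stack head = Python list end
def pvALoop : List Char → List String → Nat → String
  | [], stack, count =>
      if stack.isEmpty then "YES" else "NO " ++ toString count
  | '(' :: '*' :: rest, stack, count =>
      if (pvBDict.map Prod.snd).contains "(*" then pvALoop rest ("(*" :: stack) (count + 1)
      else if (pvBDict.map Prod.fst).contains "(*" then
        match stack with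
        | [] => "NO " ++ toString (count + 1)
        | top :: stack' =>
          if top ≠ ((pvBDict.lookup "(*").getD "") then "NO " ++ toString (count + 1)
          else pvALoop rest stack' (count + 1)
      else pvALoop rest stack (count + 1)
  | '*' :: ')' :: rest, stack, count =>
      if (pvBDict.map Prod.snd).contains "*)" then pvALoop rest ("*)" :: stack) (count + 1)
      else if (pvBDict.map Prod.fst).contains "*)" then
        match stack with
        | [] => "NO " ++ toString (count + 1)
        | top :: stack' =>
          if top ≠ ((pvBDict.lookup "*)").getD "") then "NO " ++ toString (count + 1)
          else pvALoop rest stack' (count + 1)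
      else pvALoop rest stack (count + 1)
  | c :: rest, stack, count =>
      if (pvBDict.map Prod.snd).contains (String.ofList [c]) then
        pvALoop rest (String.ofList [c] :: stack) (count + 1)
      else if (pvBDict.map Prod.fst).contains (String.ofList [c]) then
        match stack with
        | [] => "NO " ++ toString (count + 1)
        | top :: stack' =>
          if top ≠ ((pvBDict.lookup (String.ofList [c])).getD "") then "NO " ++ toString (count + 1)
          else pvALoop rest stack' (count + 1)
      else pvALoop rest stack (count + 1)

def bracket_checker (string : String) : String :=
  pvALoop string.toList [] 0

-- ===== PORT B =====
-- phase 1 of B: tokenize, grouping '(*' and '*)'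
def pvTokenize : List Char → List String
  | [] => []
  | '(' :: '*' :: rest => "(*" :: pvTokenize rest
  | '*' :: ')' :: rest => "*)" :: pvTokenize rest
  | c :: rest => String.ofList [c] :: pvTokenize rest

def pvOpeners : List String := ["(", "{", "[", "<", "(*"]

def pvPairs : List (String × String) := [(")", "("), ("}", "{"), ("]", "["), (">", "<"), ("*)", "(*")]

-- phase 2 of B: fold over the token list with an explicit stack; idx = enumerate index, total = len(tokens)
def pvBGo (total : Nat) : List String → List String → Nat → String
  | [], stack, _ =>
      if stack.isEmpty then "YES" else "NO " ++ toString total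
  | tok :: toks, stack, idx =>
      if pvOpeners.contains tok then pvBGo total toks (tok :: stack) (idx + 1)
      else if (pvPairs.map Prod.fst).contains tok then
        match stack with
        | [] => "NO " ++ toString (idx + 1)
        | top :: stack' =>
          if top ≠ ((pvPairs.lookup tok).getD "") then "NO " ++ toString (idx + 1)
          else pvBGo total toks stack' (idx + 1)
      else pvBGo total toks stack (idx + 1)

def bracket_checker_alt (string : String) : String :=
  let tokens := pvTokenize string.toList
  pvBGo tokens.length tokens [] 0

-- ===== PRECONDITION & SPEC =====
def Spec_bracket_checker (string : String) (out : String) : Prop := out = bracket_checker_alt string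
instance (string : String) (out : String) : Decidable (Spec_bracket_checker string out) := by unfold Spec_bracket_checker; infer_instance

-- ===== CLAIM (what is proved, stated in full; the proofs are below) =====
def Claim_equal_bracket_checker : Prop := ∀ (string : String), Dom_bracket_checker string → Spec_bracket_checker string (bracket_checker string)

-- ===== LEMMAS AND PROOFS =====

-- A's loop equals B's fold over the tokenization, for every stack and counter,
-- provided total = count + number of remaining tokens.
theorem pvALoop_eq_pvBGo (s : List Char) (stack : List String) (count : Nat) :
    pvALoop s stack count = pvBGo (count + (pvTokenize s).length) (pvTokenize s) stack count := by
  fun_induction pvALoop s stack count <;>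
    simp_all [pvTokenize, pvBGo, pvBDict, pvPairs, pvOpeners, List.isEmpty_iff,
      Nat.add_comm, Nat.add_left_comm]

theorem bracket_checker_spec' (string : String) :
    bracket_checker string = bracket_checker_alt string := by
  simpa [bracket_checker, bracket_checker_alt] using
    pvALoop_eq_pvBGo string.toList [] 0

-- ===== VERDICT (by name: the statement is the Claim_ definition above) =====
theorem bracket_checker_spec : Claim_equal_bracket_checker := by
  intro string _
  exact bracket_checker_spec' string
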